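-- pv_equiv track=rewrite | github.com/HICE-CodingTestStudy/solved | additionalProblem/week28_hsw/양궁대회.py | solution
-- ===== SOURCE A (Python) =====
-- def solution(n, info):
--     ans = [0] * 11
--     arr = [0]*11
--     maxDiff = 0
--
--     for subset in range(1, 1 << 10):
--         ryan = 0
--         peach = 0
--         cnt = 0
--
--         for i in range(10):
--             if subset & (1<<i):
--                 ryan += 10-i
--                 arr[i] = info[i]+1
--                 cnt += arr[i]
--             else:
--                 arr[i] = 0
--                 if info[i]:
--                     peach += 10-i
--
--         if cnt > n :
--             continue
--         arr[10] = n - cnt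
--
--         if ryan - peach == maxDiff:
--             for j in reversed(range(11)):
--                 if arr[j] > ans[j]:
--                     maxDiff = ryan - peach
--                     ans = arr[:]
--                     break
--                 elif arr[j] < ans[j]:
--                     break
--
--         elif ryan - peach > maxDiff:
--             maxDiff = ryan - peach
--             ans = arr[:]
--
--     if maxDiff == 0:
--         ans = [-1]
--     return ans
-- ===== SOURCE B (Python) =====
-- def solution(n, info):
--     best = None  # (diff, reversed full allocation), compared with Python's tuple order
--
--     def go(i, ryan, peach, spent, tail):
--         # decide target i (from 9 down to 0); tail = allocation for targets i+1..9
--         nonlocal best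
--         if i < 0:
--             diff = ryan - peach
--             if diff > 0 and spent <= n:
--                 key = (diff, (tail + [n - spent])[::-1])
--                 if best is None or key > best:
--                     best = key
--             return
--         go(i - 1, ryan, peach + (10 - i if info[i] else 0), spent, [0] + tail)
--         go(i - 1, ryan + 10 - i, peach, spent + info[i] + 1, [info[i] + 1] + tail)
--
--     go(9, 0, 0, 0, [])
--     return best[1][::-1] if best is not None else [-1]
-- ===== Notes on version B (the rewrite author's own statement) =====
-- stated objective: alternative
-- what changed: A enumerates bitmasks 1..1023 with an inner bit-test loop over a mutable 11-slot array and an index-scanning tie loop over (ans, maxDiff); B is a win/skip DFS recursion over targets 9..0 that threads (ryan, peach, spent), builds the allocation back-to-front by prepending, and keeps the running best as a (diff, reversed allocation) key compared with Python's native tuple/list ordering.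
import Mathlib
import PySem

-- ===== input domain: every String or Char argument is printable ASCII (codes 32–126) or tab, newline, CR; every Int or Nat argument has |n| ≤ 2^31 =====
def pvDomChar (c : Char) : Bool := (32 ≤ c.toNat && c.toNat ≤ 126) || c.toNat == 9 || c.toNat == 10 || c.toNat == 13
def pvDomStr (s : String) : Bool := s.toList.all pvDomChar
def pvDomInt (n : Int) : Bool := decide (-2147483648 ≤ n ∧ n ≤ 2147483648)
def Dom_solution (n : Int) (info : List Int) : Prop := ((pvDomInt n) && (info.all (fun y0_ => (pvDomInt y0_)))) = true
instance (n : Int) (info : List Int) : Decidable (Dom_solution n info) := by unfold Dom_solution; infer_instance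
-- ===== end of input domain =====

-- B replaces A's bitmask enumeration (inner bit-test loop per subset, mutable arr, the
-- index-scanning tie loop) by a win/skip DFS recursion over targets 9..0 that threads
-- (ryan, peach, spent) and builds the allocation back-to-front, keeping the running best
-- as a (diff, reversed allocation) key compared with Python's native tuple order;
-- return value only.


-- ===== PORT A =====
-- the tie-break loop 'for j in reversed(range(11))' with its two breaks, as recursion on the index list
def solTie (arr ans : List Int) : List Nat → Bool
  | [] => false
  | j :: rest =>
    if PySem.List.pyGetD arr (j:Int) 0 > PySem.List.pyGetD ans (j:Int) 0 then true
    else if PySem.List.pyGetD arr (j:Int) 0 < PySem.List.pyGetD ans (j:Int) 0 then false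
    else solTie arr ans rest

-- body of 'for i in range(10)': state (ryan, peach, cnt, arr)
def solInner (info : List Int) (subset : Int) (st : Int × Int × Int × List Int) (i : Nat) :
    Int × Int × Int × List Int :=
  if PySem.Int.band subset ((1:Int) <<< i) ≠ 0 then
    let v := PySem.List.pyGetD info (i:Int) 0 + 1
    (st.1 + (10 - (i:Int)), st.2.1, st.2.2.1 + v, PySem.List.pySetD st.2.2.2 (i:Int) v)
  else
    (st.1, if PySem.List.pyGetD info (i:Int) 0 ≠ 0 then st.2.1 + (10 - (i:Int)) else st.2.1,
      st.2.2.1, PySem.List.pySetD st.2.2.2 (i:Int) 0)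

-- body of 'for subset in range(1, 1 << 10)': state (ans, arr, maxDiff)
def solStep (n : Int) (info : List Int) (st : List Int × List Int × Int) (subset : Int) :
    List Int × List Int × Int :=
  let r := (List.range 10).foldl (solInner info subset) (0, 0, 0, st.2.1)
  if r.2.2.1 > n then (st.1, r.2.2.2, st.2.2)
  else
    let arr2 := PySem.List.pySetD r.2.2.2 (10:Int) (n - r.2.2.1)
    if r.1 - r.2.1 = st.2.2 then
      if solTie arr2 st.1 (List.range 11).reverse then (arr2, arr2, r.1 - r.2.1)
      else (st.1, arr2, st.2.2)
    else if r.1 - r.2.1 > st.2.2 then (arr2, arr2, r.1 - r.2.1)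
    else (st.1, arr2, st.2.2)

def solution (n : Int) (info : List Int) : List Int :=
  let res := (PySem.List.pyRange 1 ((1:Int) <<< (10:Nat)) 1).foldl (solStep n info)
      (List.replicate 11 (0:Int), List.replicate 11 (0:Int), (0:Int))
  if res.2.2 = 0 then [-1] else res.1

-- ===== PORT B =====
-- Python's '>' on two lists of ints (lexicographic; here always applied at equal length 11)
def pyListGT : List Int → List Int → Bool
  | _ :: _, [] => true
  | [], _ => false
  | x :: xs, y :: ys => if x > y then true else if x < y then false else pyListGT xs ys

-- Python's '>' on the (diff, reversed allocation) keys (tuple comparison)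
def keyGT (a b : Int × List Int) : Bool :=
  if a.1 > b.1 then true else if a.1 < b.1 then false else pyListGT a.2 b.2

-- go(i, ryan, peach, spent, tail): fuel f is python's i+1, so f = 0 is the leaf i = -1
def goB (n : Int) (info : List Int) : Nat → Int → Int → Int → List Int →
    Option (Int × List Int) → Option (Int × List Int)
  | 0, ryan, peach, spent, tail, best =>
    let diff := ryan - peach
    if diff > 0 ∧ spent ≤ n then
      let key : Int × List Int := (diff, (tail ++ [n - spent]).reverse)
      match best with
      | none => some key
      | some b => if keyGT key b then some key else some b
    else best
  | (f+1), ryan, peach, spent, tail, best =>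
    let a := PySem.List.pyGetD info (f:Int) 0
    let b1 := goB n info f ryan (if a ≠ 0 then peach + (10 - (f:Int)) else peach) spent
      ((0:Int) :: tail) best
    goB n info f (ryan + 10 - (f:Int)) peach (spent + a + 1) ((a + 1) :: tail) b1

def solution_alt (n : Int) (info : List Int) : List Int :=
  match goB n info 10 0 0 0 [] none with
  | some k => k.2.reverse
  | none => [-1]

-- ===== PRECONDITION & SPEC =====
-- Pre_ excludes exactly the inputs where A raises IndexError (info shorter than 10); B raises there too.
def Pre_solution (n : Int) (info : List Int) : Prop := 10 ≤ info.length
instance (n : Int) (info : List Int) : Decidable (Pre_solution n info) := by unfold Pre_solution; infer_instance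
def pvWitness_solution : Int × List Int := (5, [2, 1, 1, 1, 0, 0, 0, 0, 0, 0])

def Spec_solution (n : Int) (info : List Int) (out : List Int) : Prop := out = solution_alt n info
instance (n : Int) (info : List Int) (out : List Int) : Decidable (Spec_solution n info out) := by unfold Spec_solution; infer_instance

-- ===== CLAIM (what is proved, stated in full; the proofs are below) =====
def Claim_equal_solution : Prop := ∀ (n : Int) (info : List Int), Dom_solution n info → Pre_solution n info → Spec_solution n info (solution n info)

-- ===== LEMMAS AND PROOFS =====

-- spec-level candidate for subset s: (allocation, ryan, peach, spent), built over targets 0..k-1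
def candStep (info : List Int) (s : Nat) (t : List Int × Int × Int × Int) (i : Nat) :
    List Int × Int × Int × Int :=
  let v := PySem.List.pyGetD info (i:Int) 0
  if s.testBit i then (t.1 ++ [v + 1], t.2.1 + (10 - (i:Int)), t.2.2.1, t.2.2.2 + v + 1)
  else (t.1 ++ [0], t.2.1, if v ≠ 0 then t.2.2.1 + (10 - (i:Int)) else t.2.2.1, t.2.2.2)

def candK (info : List Int) (k : Nat) (s : Nat) : List Int × Int × Int × Int :=
  (List.range k).foldl (candStep info s) ([], 0, 0, 0)

-- the best-scan step on a candidate, B-shaped: skip unless diff > 0 and spent ≤ n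
def altB (n : Int) (best : Option (Int × List Int)) (t : List Int × Int × Int × Int) :
    Option (Int × List Int) :=
  if t.2.1 - t.2.2.1 > 0 ∧ t.2.2.2 ≤ n then
    let key : Int × List Int := (t.2.1 - t.2.2.1, (t.1 ++ [n - t.2.2.2]).reverse)
    match best with
    | none => some key
    | some b => if keyGT key b then some key else some b
  else best

-- bit-test bridge
theorem band_shift_testBit (s i : Nat) :
    (PySem.Int.band (s:Int) ((1:Int) <<< i) ≠ 0) ↔ s.testBit i := by
  rw [show ((1:Int) <<< i) = ((1 <<< i : Nat) : Int) by simp [Int.shiftLeft_eq, Nat.shiftLeft_eq]]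
  rw [PySem.Int.band_natCast, Nat.one_shiftLeft, Nat.and_two_pow]
  rcases h : s.testBit i <;> simp

theorem candStep_len (info : List Int) (s : Nat) (t : List Int × Int × Int × Int) (i : Nat) :
    (candStep info s t i).1.length = t.1.length + 1 := by
  unfold candStep; split <;> simp

theorem candStep_true (info : List Int) (s : Nat) (t : List Int × Int × Int × Int) (i : Nat)
    (h : s.testBit i = true) :
    candStep info s t i = (t.1 ++ [PySem.List.pyGetD info (i:Int) 0 + 1], t.2.1 + (10 - (i:Int)),
      t.2.2.1, t.2.2.2 + PySem.List.pyGetD info (i:Int) 0 + 1) := by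
  simp only [candStep, h, if_true]

theorem candStep_false (info : List Int) (s : Nat) (t : List Int × Int × Int × Int) (i : Nat)
    (h : s.testBit i = false) :
    candStep info s t i = (t.1 ++ [0], t.2.1,
      if PySem.List.pyGetD info (i:Int) 0 ≠ 0 then t.2.2.1 + (10 - (i:Int)) else t.2.2.1,
      t.2.2.2) := by
  simp only [candStep, h, Bool.false_eq_true, if_false]

theorem candK_succ (info : List Int) (k s : Nat) :
    candK info (k + 1) s = candStep info s (candK info k s) k := by
  simp only [candK, List.range_succ, List.foldl_append, List.foldl_cons, List.foldl_nil]

theorem candK_len (info : List Int) (k s : Nat) : (candK info k s).1.length = k := by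
  induction k with
  | zero => rfl
  | succ k ih => rw [candK_succ, candStep_len, ih]

-- A's inner loop computes the candidate, writing its allocation over arr's first k cells
theorem inner_eq (info : List Int) (s : Nat) (k : Nat) (hk : k ≤ 10)
    (arr : List Int) (h : arr.length = 11) :
    (List.range k).foldl (solInner info (s:Int)) (0, 0, 0, arr)
      = ((candK info k s).2.1, (candK info k s).2.2.1, (candK info k s).2.2.2,
         (candK info k s).1 ++ arr.drop k) := by
  induction k with
  | zero => simp [candK]
  | succ k ih =>
    have hk' : k ≤ 10 := Nat.le_of_succ_le hk
    have hkl : k < arr.length := by omega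
    have hal : (candK info k s).1.length = k := candK_len info k s
    have hset : ∀ v : Int, PySem.List.pySetD ((candK info k s).1 ++ arr.drop k) (k:Int) v
        = ((candK info k s).1 ++ [v]) ++ arr.drop (k + 1) := by
      intro v
      rw [PySem.List.pySetD_natCast, List.set_append, if_neg (by omega),
        List.drop_eq_getElem_cons hkl, hal, Nat.sub_self, List.set_cons_zero,
        List.append_assoc, List.singleton_append]
    rw [List.range_succ, List.foldl_append, List.foldl_cons, List.foldl_nil, ih hk',
      candK_succ]
    unfold solInner candStep
    by_cases hb : s.testBit k = true
    · rw [if_pos ((band_shift_testBit s k).mpr hb), if_pos hb]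
      simp only [hset]
      refine Prod.ext rfl (Prod.ext rfl (Prod.ext ?_ rfl))
      show _ + (PySem.List.pyGetD info (k:Int) 0 + 1) = _ + PySem.List.pyGetD info (k:Int) 0 + 1
      ring
    · rw [if_neg (by simpa [hb] using fun hc => hb ((band_shift_testBit s k).mp hc)),
        if_neg hb]
      simp only [hset]

-- candK only reads bits below k
theorem candK_congr (info : List Int) (k : Nat) (s s' : Nat)
    (h : ∀ i < k, s.testBit i = s'.testBit i) : candK info k s = candK info k s' := by
  induction k with
  | zero => rfl
  | succ k ih =>
    rw [candK_succ, candK_succ, ih (fun i hi => h i (Nat.lt_succ_of_lt hi))]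
    unfold candStep
    rw [h k (Nat.lt_succ_self k)]

-- B's DFS is a left fold of the best-scan over the candidates of subsets 0..2^f-1 in order,
-- each extended by the carried (tail, ryan, peach, spent)
theorem goB_eq (n : Int) (info : List Int) (f : Nat) :
    ∀ (r p c : Int) (tail : List Int) (best : Option (Int × List Int)),
    goB n info f r p c tail best =
      (List.range (2 ^ f)).foldl (fun b s =>
        altB n b ((candK info f s).1 ++ tail, r + (candK info f s).2.1,
          p + (candK info f s).2.2.1, c + (candK info f s).2.2.2)) best := by
  induction f with
  | zero =>
    intro r p c tail best
    show goB n info 0 r p c tail best = altB n best ((candK info 0 0).1 ++ tail, _, _, _)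
    simp only [goB, altB, candK, List.range_zero, List.foldl_nil, List.nil_append,
      add_zero]
  | succ f ih =>
    intro r p c tail best
    have hskip : ∀ (b : Option (Int × List Int)) (s : Nat), s < 2 ^ f →
        altB n b ((candK info f s).1 ++ (0:Int) :: tail, r + (candK info f s).2.1,
          (if PySem.List.pyGetD info (f:Int) 0 ≠ 0 then p + (10 - (f:Int)) else p)
            + (candK info f s).2.2.1,
          c + (candK info f s).2.2.2)
        = altB n b ((candK info (f+1) s).1 ++ tail, r + (candK info (f+1) s).2.1,
          p + (candK info (f+1) s).2.2.1, c + (candK info (f+1) s).2.2.2) := by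
      intro b s hs
      rw [candK_succ, candStep_false info s _ f (Nat.testBit_lt_two_pow hs)]
      dsimp only
      congr 1
      refine Prod.ext ?_ (Prod.ext rfl (Prod.ext ?_ rfl))
      · rw [List.append_assoc, List.singleton_append]
      · by_cases ha : PySem.List.pyGetD info (f:Int) 0 ≠ 0
        · rw [if_pos ha, if_pos ha]; ring
        · rw [if_neg ha, if_neg ha]
    have hwin : ∀ (b : Option (Int × List Int)) (s : Nat), s < 2 ^ f →
        altB n b ((candK info f s).1 ++ (PySem.List.pyGetD info (f:Int) 0 + 1) :: tail,
          (r + 10 - (f:Int)) + (candK info f s).2.1, p + (candK info f s).2.2.1,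
          (c + PySem.List.pyGetD info (f:Int) 0 + 1) + (candK info f s).2.2.2)
        = altB n b ((candK info (f+1) (2 ^ f + s)).1 ++ tail,
          r + (candK info (f+1) (2 ^ f + s)).2.1,
          p + (candK info (f+1) (2 ^ f + s)).2.2.1,
          c + (candK info (f+1) (2 ^ f + s)).2.2.2) := by
      intro b s hs
      rw [candK_succ,
        candK_congr info f (2 ^ f + s) s (fun i hi => Nat.testBit_two_pow_add_gt hi s),
        candStep_true info (2 ^ f + s) _ f
          (by rw [Nat.testBit_two_pow_add_eq, Nat.testBit_lt_two_pow hs]; rfl)]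
      dsimp only
      congr 1
      refine Prod.ext ?_ (Prod.ext ?_ (Prod.ext rfl ?_))
      · rw [List.append_assoc, List.singleton_append]
      · ring
      · ring
    show goB n info f _ _ _ _ (goB n info f _ _ _ _ best) = _
    rw [ih, ih, pow_succ, Nat.mul_two, List.range_add, List.foldl_append, List.foldl_map]
    rw [List.foldl_ext _ _ best (fun b s hs => hskip b s (List.mem_range.mp hs))]
    exact List.foldl_ext _ _ _ (fun b s hs => hwin b s (List.mem_range.mp hs))

-- subset 0: ryan = 0 and peach ≥ 0
theorem candK_zero (info : List Int) (k : Nat) (hk : k ≤ 10) :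
    (candK info k 0).2.1 = 0 ∧ 0 ≤ (candK info k 0).2.2.1 := by
  induction k with
  | zero => exact ⟨rfl, le_refl 0⟩
  | succ k ih =>
    have ih := ih (Nat.le_of_succ_le hk)
    have hk10 : (k:Int) ≤ 10 := by exact_mod_cast Nat.le_of_succ_le hk
    rw [candK_succ]
    unfold candStep
    simp only [Nat.zero_testBit, Bool.false_eq_true, if_false]
    exact ⟨ih.1, by split <;> omega⟩

theorem solTie_extend (x y : Int) (as bs : List Int) (js : List Nat)
    (h : ∀ j ∈ js, j < as.length ∧ j < bs.length) :
    solTie (as ++ [x]) (bs ++ [y]) js = solTie as bs js := by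
  induction js with
  | nil => rfl
  | cons j rest ih =>
    obtain ⟨h1, h2⟩ := h j (List.mem_cons_self ..)
    have e1 : PySem.List.pyGetD (as ++ [x]) (j:Int) 0 = PySem.List.pyGetD as (j:Int) 0 := by
      rw [PySem.List.pyGetD_natCast, PySem.List.pyGetD_natCast, List.getD_append _ _ _ _ h1]
    have e2 : PySem.List.pyGetD (bs ++ [y]) (j:Int) 0 = PySem.List.pyGetD bs (j:Int) 0 := by
      rw [PySem.List.pyGetD_natCast, PySem.List.pyGetD_natCast, List.getD_append _ _ _ _ h2]
    unfold solTie
    rw [e1, e2, ih (fun j hj => h j (List.mem_cons_of_mem _ hj))]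

-- A's reversed index scan is Python's '>' on the reversed lists
theorem tie_eq (k : Nat) (a b : List Int) (ha : a.length = k) (hb : b.length = k) :
    solTie a b (List.range k).reverse = pyListGT a.reverse b.reverse := by
  induction k generalizing a b with
  | zero =>
    rw [List.eq_nil_of_length_eq_zero ha, List.eq_nil_of_length_eq_zero hb]
    rfl
  | succ k ih =>
    have ha0 : a ≠ [] := by intro h; rw [h] at ha; simp at ha
    have hb0 : b ≠ [] := by intro h; rw [h] at hb; simp at hb
    obtain ⟨x, as, rfl⟩ : ∃ x as, a = as ++ [x] :=
      ⟨a.getLast ha0, a.dropLast, (List.dropLast_append_getLast ha0).symm⟩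
    obtain ⟨y, bs, rfl⟩ : ∃ y bs, b = bs ++ [y] :=
      ⟨b.getLast hb0, b.dropLast, (List.dropLast_append_getLast hb0).symm⟩
    have has : as.length = k := by simpa using ha
    have hbs : bs.length = k := by simpa using hb
    have hrev : (List.range (k + 1)).reverse = k :: (List.range k).reverse := by
      rw [List.range_succ, List.reverse_append]; rfl
    have egx : PySem.List.pyGetD (as ++ [x]) (k:Int) 0 = x := by
      rw [PySem.List.pyGetD_natCast, ← has, List.getD_append_right _ _ _ _ (le_refl _)]
      simp
    have egy : PySem.List.pyGetD (bs ++ [y]) (k:Int) 0 = y := by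
      rw [PySem.List.pyGetD_natCast, ← hbs, List.getD_append_right _ _ _ _ (le_refl _)]
      simp
    rw [hrev]
    unfold solTie
    rw [egx, egy, List.reverse_append, List.reverse_append]
    simp only [List.reverse_cons, List.reverse_nil, List.nil_append, List.singleton_append]
    unfold pyListGT
    rcases lt_trichotomy x y with hxy | hxy | hxy
    · rw [if_neg (by omega), if_pos hxy, if_neg (by omega), if_pos hxy]
    · subst hxy
      rw [if_neg (by omega), if_neg (by omega), if_neg (by omega), if_neg (by omega)]
      rw [solTie_extend x x as bs _ (fun j hj => by
        rw [List.mem_reverse, List.mem_range] at hj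
        exact ⟨by omega, by omega⟩)]
      exact ih as bs has hbs
    · rw [if_pos hxy, if_pos hxy]

-- the invariant tying A's (ans, arr, maxDiff) state to B's running best key
def relInv (st : List Int × List Int × Int) (b : Option (Int × List Int)) : Prop :=
  st.2.1.length = 11 ∧ st.1.length = 11 ∧
    ((st.2.2 = 0 ∧ b = none) ∨ (0 < st.2.2 ∧ b = some (st.2.2, st.1.reverse)))

theorem altB_skip (n : Int) (b : Option (Int × List Int)) (t : List Int × Int × Int × Int)
    (h : ¬(t.2.1 - t.2.2.1 > 0 ∧ t.2.2.2 ≤ n)) : altB n b t = b := by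
  unfold altB; rw [if_neg h]

theorem altB_none (n : Int) (t : List Int × Int × Int × Int)
    (h : t.2.1 - t.2.2.1 > 0 ∧ t.2.2.2 ≤ n) :
    altB n none t = some (t.2.1 - t.2.2.1, (t.1 ++ [n - t.2.2.2]).reverse) := by
  unfold altB; rw [if_pos h]

theorem altB_some (n : Int) (b : Int × List Int) (t : List Int × Int × Int × Int)
    (h : t.2.1 - t.2.2.1 > 0 ∧ t.2.2.2 ≤ n) :
    altB n (some b) t =
      if keyGT (t.2.1 - t.2.2.1, (t.1 ++ [n - t.2.2.2]).reverse) b then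
        some (t.2.1 - t.2.2.1, (t.1 ++ [n - t.2.2.2]).reverse) else some b := by
  unfold altB; rw [if_pos h]

theorem step_rel (n : Int) (info : List Int) (st : List Int × List Int × Int)
    (best : Option (Int × List Int)) (s : Nat) (h : relInv st best) :
    relInv (solStep n info st (s:Int)) (altB n best (candK info 10 s)) := by
  obtain ⟨harr, hans, hrel⟩ := h
  have hlen := candK_len info 10 s
  have hinner := inner_eq info s 10 (le_refl 10) st.2.1 harr
  have hdlen : (st.2.1.drop 10).length = 1 := by simp [harr]
  have h2 : PySem.List.pySetD ((candK info 10 s).1 ++ st.2.1.drop 10) (10:Int)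
      (n - (candK info 10 s).2.2.2) = (candK info 10 s).1 ++ [n - (candK info 10 s).2.2.2] := by
    rw [show ((10:Int)) = ((10:Nat):Int) by norm_num, PySem.List.pySetD_natCast,
      List.set_append, if_neg (by omega)]
    congr 1
    rcases hd : st.2.1.drop 10 with _ | ⟨z, t⟩
    · rw [hd] at hdlen; simp at hdlen
    · rw [hd] at hdlen
      have : t = [] := by
        rcases t with _ | _
        · rfl
        · simp at hdlen
      subst this
      simp [hlen]
  set c := candK info 10 s with hc'
  have hfl : (c.1 ++ [n - c.2.2.2]).length = 11 := by simp [hlen]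
  have htie : solTie (c.1 ++ [n - c.2.2.2]) st.1 (List.range 11).reverse
      = pyListGT (c.1 ++ [n - c.2.2.2]).reverse st.1.reverse :=
    tie_eq 11 _ _ hfl hans
  unfold solStep
  rw [hinner]
  dsimp only
  simp only [h2]
  by_cases hcn : c.2.2.2 > n
  · rw [if_pos hcn, altB_skip n best c (by omega)]
    exact ⟨by simp [hlen, harr], hans, hrel⟩
  · rw [if_neg hcn]
    rcases hrel with ⟨hmd, hbest⟩ | ⟨hmd, hbest⟩ <;> subst hbest
    · -- maxDiff = 0, no best yet
      by_cases hdm : c.2.1 - c.2.2.1 = st.2.2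
      · rw [if_pos hdm, altB_skip n none c (by omega)]
        split
        · exact ⟨hfl, hfl, Or.inl ⟨show c.2.1 - c.2.2.1 = 0 by omega, rfl⟩⟩
        · exact ⟨hfl, hans, Or.inl ⟨hmd, rfl⟩⟩
      · rw [if_neg hdm]
        by_cases hgt : c.2.1 - c.2.2.1 > st.2.2
        · rw [if_pos hgt, altB_none n c ⟨by omega, by omega⟩]
          exact ⟨hfl, hfl, Or.inr ⟨show 0 < c.2.1 - c.2.2.1 by omega, rfl⟩⟩
        · rw [if_neg hgt, altB_skip n none c (by omega)]
          exact ⟨hfl, hans, Or.inl ⟨hmd, rfl⟩⟩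
    · -- maxDiff > 0, best = some (maxDiff, ans.reverse)
      by_cases hdm : c.2.1 - c.2.2.1 = st.2.2
      · rw [if_pos hdm, altB_some n _ c ⟨by omega, by omega⟩]
        have hkey : keyGT (c.2.1 - c.2.2.1, (c.1 ++ [n - c.2.2.2]).reverse)
            (st.2.2, st.1.reverse)
            = pyListGT (c.1 ++ [n - c.2.2.2]).reverse st.1.reverse := by
          unfold keyGT
          dsimp only
          rw [if_neg (by omega), if_neg (by omega)]
        by_cases hrl : pyListGT (c.1 ++ [n - c.2.2.2]).reverse st.1.reverse = true
        · rw [if_pos (show solTie (c.1 ++ [n - c.2.2.2]) st.1 (List.range 11).reverse = true by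
              rw [htie]; exact hrl),
            if_pos (show keyGT (c.2.1 - c.2.2.1, (c.1 ++ [n - c.2.2.2]).reverse)
                (st.2.2, st.1.reverse) = true by rw [hkey]; exact hrl)]
          exact ⟨hfl, hfl, Or.inr ⟨show 0 < c.2.1 - c.2.2.1 by omega, rfl⟩⟩
        · rw [if_neg (show ¬ solTie (c.1 ++ [n - c.2.2.2]) st.1 (List.range 11).reverse = true by
              rw [htie]; exact hrl),
            if_neg (show ¬ keyGT (c.2.1 - c.2.2.1, (c.1 ++ [n - c.2.2.2]).reverse)
                (st.2.2, st.1.reverse) = true by rw [hkey]; exact hrl)]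
          exact ⟨hfl, hans, Or.inr ⟨hmd, rfl⟩⟩
      · rw [if_neg hdm]
        by_cases hgt : c.2.1 - c.2.2.1 > st.2.2
        · rw [if_pos hgt, altB_some n _ c ⟨by omega, by omega⟩,
            if_pos (show keyGT (c.2.1 - c.2.2.1, (c.1 ++ [n - c.2.2.2]).reverse)
                (st.2.2, st.1.reverse) = true by
              unfold keyGT; dsimp only; rw [if_pos (by omega)])]
          exact ⟨hfl, hfl, Or.inr ⟨show 0 < c.2.1 - c.2.2.1 by omega, rfl⟩⟩
        · rw [if_neg hgt]
          by_cases hle : c.2.1 - c.2.2.1 ≤ 0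
          · rw [altB_skip n _ c (by omega)]
            exact ⟨hfl, hans, Or.inr ⟨hmd, rfl⟩⟩
          · rw [altB_some n _ c ⟨by omega, by omega⟩,
              if_neg (show ¬ keyGT (c.2.1 - c.2.2.1, (c.1 ++ [n - c.2.2.2]).reverse)
                  (st.2.2, st.1.reverse) = true by
                unfold keyGT; dsimp only
                rw [if_neg (by omega), if_pos (by omega)]
                simp)]
            exact ⟨hfl, hans, Or.inr ⟨hmd, rfl⟩⟩

theorem main_fold (n : Int) (info : List Int) (l : List Nat) :
    ∀ (st : List Int × List Int × Int) (best : Option (Int × List Int)), relInv st best →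
    relInv (l.foldl (fun st (k : Nat) => solStep n info st (1 + (k:Int))) st)
      (l.foldl (fun b k => altB n b (candK info 10 (k + 1))) best) := by
  induction l with
  | nil => exact fun st best h => h
  | cons k rest ih =>
    intro st best h
    simp only [List.foldl_cons]
    apply ih
    have := step_rel n info st best (k + 1) h
    rw [show (((k + 1 : Nat)) : Int) = 1 + (k:Int) by push_cast; ring] at this
    exact this

-- B never records the all-skip candidate (subset 0): its difference is ≤ 0
theorem first_noop (n : Int) (info : List Int) : altB n none (candK info 10 0) = none := by
  obtain ⟨hr, hp⟩ := candK_zero info 10 (by norm_num)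
  unfold altB
  rw [if_neg (by omega)]

-- ===== VERDICT (by name: the statement is the Claim_ definition above) =====
theorem solution_spec : Claim_equal_solution := by
  unfold Claim_equal_solution
  intro n info _ _
  show solution n info = solution_alt n info
  unfold solution solution_alt
  dsimp only
  rw [goB_eq]
  have hsimp : (fun b s => altB n b ((candK info 10 s).1 ++ [], 0 + (candK info 10 s).2.1,
      0 + (candK info 10 s).2.2.1, 0 + (candK info 10 s).2.2.2))
      = fun b s => altB n b (candK info 10 s) := by
    funext b s
    rw [List.append_nil, zero_add, zero_add, zero_add]
  rw [hsimp, show (2:Nat) ^ 10 = 1023 + 1 from by norm_num,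
    List.range_succ_eq_map, List.foldl_cons, List.foldl_map, first_noop n info]
  rw [show ((1:Int) <<< (10:Nat)) = 1024 from by decide, PySem.List.pyRange_one,
    show ((1024:Int) - 1).toNat = 1023 from by decide, List.foldl_map]
  simp only [Nat.succ_eq_add_one]
  have hmain := main_fold n info (List.range 1023)
    (List.replicate 11 (0:Int), List.replicate 11 (0:Int), (0:Int)) none
    ⟨by simp, by simp, Or.inl ⟨rfl, rfl⟩⟩
  rcases hmain.2.2 with ⟨hmd, hb⟩ | ⟨hmd, hb⟩
  · rw [hb, hmd]
    rfl
  · rw [hb, if_neg (by omega)]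
    dsimp only
    rw [List.reverse_reverse]
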